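-- pv_equiv track=rewrite | github.com/Naveen2003Raj/Hi | qr_utils.py | parse_smartcard_data
-- ===== SOURCE A (Python) =====
-- def parse_smartcard_data(data):
--     """Parses Smart Card QR text data into structured dictionary."""
--     result = {
--         "card_number": "",
--         "card_type": "",
--         "head_of_family": "",
--         "address": "",
--         "family_members": "",
--         "issued_by": "",
--         "aadhaar_link_status": ""
--     }
--
--     for field in data.split('\n'):
--         field_lower = field.lower()
--
--         if 'card number' in field_lower:
--             result['card_number'] = field.split(':')[-1].strip()
--         elif 'type' in field_lower:
--             result['card_type'] = field.split(':')[-1].strip()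
--         elif 'head' in field_lower:
--             result['head_of_family'] = field.split(':')[-1].strip()
--         elif 'address' in field_lower:
--             result['address'] = field.split(':')[-1].strip()
--         elif 'members' in field_lower:
--             result['family_members'] = field.split(':')[-1].strip()
--         elif 'issued' in field_lower:
--             result['issued_by'] = field.split(':')[-1].strip()
--         elif 'linked' in field_lower:
--             result['aadhaar_link_status'] = field.split(':')[-1].strip()
--
--     return result
-- ===== SOURCE B (Python) =====
-- FIELDS = [
--     ('card number', 'card_number'),
--     ('type', 'card_type'),
--     ('head', 'head_of_family'),
--     ('address', 'address'),
--     ('members', 'family_members'),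
--     ('issued', 'issued_by'),
--     ('linked', 'aadhaar_link_status'),
-- ]
--
--
-- def _classify(line):
--     low = line.lower()
--     for kw, key in FIELDS:
--         if kw in low:
--             return key
--     return None
--
--
-- def parse_smartcard_data(data):
--     """Parses Smart Card QR text data into structured dictionary."""
--     lines = data.split('\n')
--     result = {}
--     for _, key in FIELDS:
--         value = ""
--         for line in reversed(lines):
--             if _classify(line) == key:
--                 value = line.split(':')[-1].strip()
--                 break
--         result[key] = value
--     return result
-- ===== Notes on version B (the rewrite author's own statement) =====
-- stated objective: alternative
-- what changed: A folds a mutable 7-key dict over the lines with an if/elif chain; B instead loops over the seven (keyword, key) table entries and, for each key, scans the lines in reverse for the last line whose first matching keyword is that key, building the result dict key by key.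
import Mathlib
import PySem

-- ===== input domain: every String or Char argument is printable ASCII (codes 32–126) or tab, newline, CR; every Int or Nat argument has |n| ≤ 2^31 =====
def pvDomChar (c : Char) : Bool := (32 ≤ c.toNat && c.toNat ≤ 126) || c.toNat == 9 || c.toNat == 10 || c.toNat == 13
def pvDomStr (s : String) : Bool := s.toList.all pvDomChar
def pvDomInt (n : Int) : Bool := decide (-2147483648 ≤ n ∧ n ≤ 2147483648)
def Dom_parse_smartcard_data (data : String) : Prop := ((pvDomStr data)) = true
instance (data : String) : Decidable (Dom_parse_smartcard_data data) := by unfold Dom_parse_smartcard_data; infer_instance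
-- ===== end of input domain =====

-- B re-implements A's per-line if/elif update loop as a per-key reverse scan (for each output key,
-- find the last line whose first matching keyword is that key); objective: alternative decomposition.

-- ===== PORT A =====
-- field.split(':')[-1].strip()  (split(':') is never empty, so the [-1] never raises; getD "" is unreachable)
def pvVal (field : String) : String :=
  PySem.Str.strip ((PySem.List.pyGet? ((PySem.Str.split? field ":").getD []) (-1)).getD "")

-- one iteration of A's for-loop body (the if/elif chain, branches in A's order)
def pvStepA (d : PySem.Dict String String) (field : String) : PySem.Dict String String :=
  let low := PySem.Str.lower field
  if PySem.Str.isIn "card number" low then d.insert "card_number" (pvVal field)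
  else if PySem.Str.isIn "type" low then d.insert "card_type" (pvVal field)
  else if PySem.Str.isIn "head" low then d.insert "head_of_family" (pvVal field)
  else if PySem.Str.isIn "address" low then d.insert "address" (pvVal field)
  else if PySem.Str.isIn "members" low then d.insert "family_members" (pvVal field)
  else if PySem.Str.isIn "issued" low then d.insert "issued_by" (pvVal field)
  else if PySem.Str.isIn "linked" low then d.insert "aadhaar_link_status" (pvVal field)
  else d

def parse_smartcard_data (data : String) : List (String × String) :=
  -- data.split('\n'): sep ≠ "" so split? is always some; getD [""] is unreachable
  (((PySem.Str.split? data "\n").getD [""]).foldl pvStepA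
    (PySem.Dict.ofList [("card_number", ""), ("card_type", ""), ("head_of_family", ""),
      ("address", ""), ("family_members", ""), ("issued_by", ""), ("aadhaar_link_status", "")])).items

-- ===== PORT B =====
def pvFields : List (String × String) :=
  [("card number", "card_number"), ("type", "card_type"), ("head", "head_of_family"),
   ("address", "address"), ("members", "family_members"), ("issued", "issued_by"),
   ("linked", "aadhaar_link_status")]

-- _classify(line): key of the first keyword contained in line.lower(), else None
def pvClassify (line : String) : Option String :=
  let low := PySem.Str.lower line
  (pvFields.find? (fun p => PySem.Str.isIn p.1 low)).map (·.2)

-- the inner reversed-lines scan of B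
def pvValueFor (key : String) (lines : List String) : String :=
  match lines.reverse.find? (fun l => pvClassify l == some key) with
  | some l => pvVal l
  | none => ""

def parse_smartcard_data_alt (data : String) : List (String × String) :=
  let lines := (PySem.Str.split? data "\n").getD [""]
  pvFields.map (fun p => (p.2, pvValueFor p.2 lines))

-- ===== PRECONDITION & SPEC =====
def Spec_parse_smartcard_data (data : String) (out : List (String × String)) : Prop := out = parse_smartcard_data_alt data
instance (data : String) (out : List (String × String)) : Decidable (Spec_parse_smartcard_data data out) := by unfold Spec_parse_smartcard_data; infer_instance

-- ===== CLAIM (what is proved, stated in full; the proofs are below) =====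
def Claim_equal_parse_smartcard_data : Prop := ∀ (data : String), Dom_parse_smartcard_data data → Spec_parse_smartcard_data data (parse_smartcard_data data)

-- ===== LEMMAS AND PROOFS =====

-- the last matching line's value, as an Option (none = no line of `lines` classifies to `key`)
def pvLast? (key : String) (lines : List String) : Option String :=
  (lines.reverse.find? (fun l => pvClassify l == some key)).map pvVal

theorem pvValueFor_eq (key : String) (lines : List String) :
    pvValueFor key lines = (pvLast? key lines).getD "" := by
  unfold pvValueFor pvLast?
  rcases lines.reverse.find? (fun l => pvClassify l == some key) with _ | l <;> rfl

-- a line classifying to `key` pushes its value into the default slot of the tail's scan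
theorem pvGetD_cons_eq (l : String) (ls : List String) (key v : String)
    (h : pvClassify l = some key) :
    (pvLast? key (l :: ls)).getD v = (pvLast? key ls).getD (pvVal l) := by
  unfold pvLast?
  rw [List.reverse_cons, List.find?_append]
  have hb : (pvClassify l == some key) = true := beq_iff_eq.mpr h
  rcases ls.reverse.find? (fun l => pvClassify l == some key) with _ | x <;> simp [hb]

-- a line NOT classifying to `key` is invisible to `key`'s scan
theorem pvLast?_cons_ne (l : String) (ls : List String) (key : String)
    (h : pvClassify l ≠ some key) :
    pvLast? key (l :: ls) = pvLast? key ls := by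
  unfold pvLast?
  rw [List.reverse_cons, List.find?_append]
  have hb : (pvClassify l == some key) = false := beq_eq_false_iff_ne.mpr h
  rcases ls.reverse.find? (fun l => pvClassify l == some key) with _ | x <;> simp [hb]

-- if `pvClassify l` is some k, it is not some k' for any other k'
theorem pvNe (l k k' : String) (h : pvClassify l = some k) (hk : k' ≠ k) :
    pvClassify l ≠ some k' :=
  fun hy => hk (Option.some.inj (h.symm.trans hy)).symm

-- the if/elif chain form of pvClassify (B's table scan = A's branch order)
theorem pvClassify_eq (l : String) :
    pvClassify l =
      (if PySem.Str.isIn "card number" (PySem.Str.lower l) then some "card_number"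
       else if PySem.Str.isIn "type" (PySem.Str.lower l) then some "card_type"
       else if PySem.Str.isIn "head" (PySem.Str.lower l) then some "head_of_family"
       else if PySem.Str.isIn "address" (PySem.Str.lower l) then some "address"
       else if PySem.Str.isIn "members" (PySem.Str.lower l) then some "family_members"
       else if PySem.Str.isIn "issued" (PySem.Str.lower l) then some "issued_by"
       else if PySem.Str.isIn "linked" (PySem.Str.lower l) then some "aadhaar_link_status"
       else none) := by
  unfold pvClassify pvFields
  simp only [List.find?]
  split_ifs <;> simp_all

-- loop invariant: folding A's step over `lines` from any 7-key dict replaces each value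
-- by the value of the last line classifying to its key (if any)
theorem pvFold_eq (lines : List String) : ∀ v1 v2 v3 v4 v5 v6 v7 : String,
    lines.foldl pvStepA (PySem.Dict.mk [("card_number", v1), ("card_type", v2), ("head_of_family", v3), ("address", v4), ("family_members", v5), ("issued_by", v6), ("aadhaar_link_status", v7)]) =
    PySem.Dict.mk [("card_number", (pvLast? "card_number" lines).getD v1), ("card_type", (pvLast? "card_type" lines).getD v2), ("head_of_family", (pvLast? "head_of_family" lines).getD v3), ("address", (pvLast? "address" lines).getD v4), ("family_members", (pvLast? "family_members" lines).getD v5), ("issued_by", (pvLast? "issued_by" lines).getD v6), ("aadhaar_link_status", (pvLast? "aadhaar_link_status" lines).getD v7)] := by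
  induction lines with
  | nil => intro v1 v2 v3 v4 v5 v6 v7; simp [pvLast?]
  | cons l ls ih =>
    intro v1 v2 v3 v4 v5 v6 v7
    rw [List.foldl_cons]
    rw [show pvStepA (PySem.Dict.mk [("card_number", v1), ("card_type", v2), ("head_of_family", v3), ("address", v4), ("family_members", v5), ("issued_by", v6), ("aadhaar_link_status", v7)]) l =
      (if PySem.Str.isIn "card number" (PySem.Str.lower l) then (PySem.Dict.mk [("card_number", v1), ("card_type", v2), ("head_of_family", v3), ("address", v4), ("family_members", v5), ("issued_by", v6), ("aadhaar_link_status", v7)]).insert "card_number" (pvVal l)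
       else if PySem.Str.isIn "type" (PySem.Str.lower l) then (PySem.Dict.mk [("card_number", v1), ("card_type", v2), ("head_of_family", v3), ("address", v4), ("family_members", v5), ("issued_by", v6), ("aadhaar_link_status", v7)]).insert "card_type" (pvVal l)
       else if PySem.Str.isIn "head" (PySem.Str.lower l) then (PySem.Dict.mk [("card_number", v1), ("card_type", v2), ("head_of_family", v3), ("address", v4), ("family_members", v5), ("issued_by", v6), ("aadhaar_link_status", v7)]).insert "head_of_family" (pvVal l)
       else if PySem.Str.isIn "address" (PySem.Str.lower l) then (PySem.Dict.mk [("card_number", v1), ("card_type", v2), ("head_of_family", v3), ("address", v4), ("family_members", v5), ("issued_by", v6), ("aadhaar_link_status", v7)]).insert "address" (pvVal l)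
       else if PySem.Str.isIn "members" (PySem.Str.lower l) then (PySem.Dict.mk [("card_number", v1), ("card_type", v2), ("head_of_family", v3), ("address", v4), ("family_members", v5), ("issued_by", v6), ("aadhaar_link_status", v7)]).insert "family_members" (pvVal l)
       else if PySem.Str.isIn "issued" (PySem.Str.lower l) then (PySem.Dict.mk [("card_number", v1), ("card_type", v2), ("head_of_family", v3), ("address", v4), ("family_members", v5), ("issued_by", v6), ("aadhaar_link_status", v7)]).insert "issued_by" (pvVal l)
       else if PySem.Str.isIn "linked" (PySem.Str.lower l) then (PySem.Dict.mk [("card_number", v1), ("card_type", v2), ("head_of_family", v3), ("address", v4), ("family_members", v5), ("issued_by", v6), ("aadhaar_link_status", v7)]).insert "aadhaar_link_status" (pvVal l)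
       else (PySem.Dict.mk [("card_number", v1), ("card_type", v2), ("head_of_family", v3), ("address", v4), ("family_members", v5), ("issued_by", v6), ("aadhaar_link_status", v7)])) from rfl]
    split_ifs with h1 h2 h3 h4 h5 h6 h7
    · have hcl : pvClassify l = some "card_number" := by rw [pvClassify_eq, if_pos h1]
      rw [show (PySem.Dict.mk [("card_number", v1), ("card_type", v2), ("head_of_family", v3), ("address", v4), ("family_members", v5), ("issued_by", v6), ("aadhaar_link_status", v7)]).insert "card_number" (pvVal l) = PySem.Dict.mk [("card_number", pvVal l), ("card_type", v2), ("head_of_family", v3), ("address", v4), ("family_members", v5), ("issued_by", v6), ("aadhaar_link_status", v7)] from rfl, ih]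
      rw [pvGetD_cons_eq l ls "card_number" v1 hcl]
      rw [pvLast?_cons_ne l ls "card_type" (pvNe l "card_number" "card_type" hcl (by decide))]
      rw [pvLast?_cons_ne l ls "head_of_family" (pvNe l "card_number" "head_of_family" hcl (by decide))]
      rw [pvLast?_cons_ne l ls "address" (pvNe l "card_number" "address" hcl (by decide))]
      rw [pvLast?_cons_ne l ls "family_members" (pvNe l "card_number" "family_members" hcl (by decide))]
      rw [pvLast?_cons_ne l ls "issued_by" (pvNe l "card_number" "issued_by" hcl (by decide))]
      rw [pvLast?_cons_ne l ls "aadhaar_link_status" (pvNe l "card_number" "aadhaar_link_status" hcl (by decide))]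
    · have hcl : pvClassify l = some "card_type" := by rw [pvClassify_eq, if_neg h1, if_pos h2]
      rw [show (PySem.Dict.mk [("card_number", v1), ("card_type", v2), ("head_of_family", v3), ("address", v4), ("family_members", v5), ("issued_by", v6), ("aadhaar_link_status", v7)]).insert "card_type" (pvVal l) = PySem.Dict.mk [("card_number", v1), ("card_type", pvVal l), ("head_of_family", v3), ("address", v4), ("family_members", v5), ("issued_by", v6), ("aadhaar_link_status", v7)] from rfl, ih]
      rw [pvGetD_cons_eq l ls "card_type" v2 hcl]
      rw [pvLast?_cons_ne l ls "card_number" (pvNe l "card_type" "card_number" hcl (by decide))]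
      rw [pvLast?_cons_ne l ls "head_of_family" (pvNe l "card_type" "head_of_family" hcl (by decide))]
      rw [pvLast?_cons_ne l ls "address" (pvNe l "card_type" "address" hcl (by decide))]
      rw [pvLast?_cons_ne l ls "family_members" (pvNe l "card_type" "family_members" hcl (by decide))]
      rw [pvLast?_cons_ne l ls "issued_by" (pvNe l "card_type" "issued_by" hcl (by decide))]
      rw [pvLast?_cons_ne l ls "aadhaar_link_status" (pvNe l "card_type" "aadhaar_link_status" hcl (by decide))]
    · have hcl : pvClassify l = some "head_of_family" := by rw [pvClassify_eq, if_neg h1, if_neg h2, if_pos h3]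
      rw [show (PySem.Dict.mk [("card_number", v1), ("card_type", v2), ("head_of_family", v3), ("address", v4), ("family_members", v5), ("issued_by", v6), ("aadhaar_link_status", v7)]).insert "head_of_family" (pvVal l) = PySem.Dict.mk [("card_number", v1), ("card_type", v2), ("head_of_family", pvVal l), ("address", v4), ("family_members", v5), ("issued_by", v6), ("aadhaar_link_status", v7)] from rfl, ih]
      rw [pvGetD_cons_eq l ls "head_of_family" v3 hcl]
      rw [pvLast?_cons_ne l ls "card_number" (pvNe l "head_of_family" "card_number" hcl (by decide))]
      rw [pvLast?_cons_ne l ls "card_type" (pvNe l "head_of_family" "card_type" hcl (by decide))]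
      rw [pvLast?_cons_ne l ls "address" (pvNe l "head_of_family" "address" hcl (by decide))]
      rw [pvLast?_cons_ne l ls "family_members" (pvNe l "head_of_family" "family_members" hcl (by decide))]
      rw [pvLast?_cons_ne l ls "issued_by" (pvNe l "head_of_family" "issued_by" hcl (by decide))]
      rw [pvLast?_cons_ne l ls "aadhaar_link_status" (pvNe l "head_of_family" "aadhaar_link_status" hcl (by decide))]
    · have hcl : pvClassify l = some "address" := by rw [pvClassify_eq, if_neg h1, if_neg h2, if_neg h3, if_pos h4]
      rw [show (PySem.Dict.mk [("card_number", v1), ("card_type", v2), ("head_of_family", v3), ("address", v4), ("family_members", v5), ("issued_by", v6), ("aadhaar_link_status", v7)]).insert "address" (pvVal l) = PySem.Dict.mk [("card_number", v1), ("card_type", v2), ("head_of_family", v3), ("address", pvVal l), ("family_members", v5), ("issued_by", v6), ("aadhaar_link_status", v7)] from rfl, ih]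
      rw [pvGetD_cons_eq l ls "address" v4 hcl]
      rw [pvLast?_cons_ne l ls "card_number" (pvNe l "address" "card_number" hcl (by decide))]
      rw [pvLast?_cons_ne l ls "card_type" (pvNe l "address" "card_type" hcl (by decide))]
      rw [pvLast?_cons_ne l ls "head_of_family" (pvNe l "address" "head_of_family" hcl (by decide))]
      rw [pvLast?_cons_ne l ls "family_members" (pvNe l "address" "family_members" hcl (by decide))]
      rw [pvLast?_cons_ne l ls "issued_by" (pvNe l "address" "issued_by" hcl (by decide))]
      rw [pvLast?_cons_ne l ls "aadhaar_link_status" (pvNe l "address" "aadhaar_link_status" hcl (by decide))]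
    · have hcl : pvClassify l = some "family_members" := by rw [pvClassify_eq, if_neg h1, if_neg h2, if_neg h3, if_neg h4, if_pos h5]
      rw [show (PySem.Dict.mk [("card_number", v1), ("card_type", v2), ("head_of_family", v3), ("address", v4), ("family_members", v5), ("issued_by", v6), ("aadhaar_link_status", v7)]).insert "family_members" (pvVal l) = PySem.Dict.mk [("card_number", v1), ("card_type", v2), ("head_of_family", v3), ("address", v4), ("family_members", pvVal l), ("issued_by", v6), ("aadhaar_link_status", v7)] from rfl, ih]
      rw [pvGetD_cons_eq l ls "family_members" v5 hcl]
      rw [pvLast?_cons_ne l ls "card_number" (pvNe l "family_members" "card_number" hcl (by decide))]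
      rw [pvLast?_cons_ne l ls "card_type" (pvNe l "family_members" "card_type" hcl (by decide))]
      rw [pvLast?_cons_ne l ls "head_of_family" (pvNe l "family_members" "head_of_family" hcl (by decide))]
      rw [pvLast?_cons_ne l ls "address" (pvNe l "family_members" "address" hcl (by decide))]
      rw [pvLast?_cons_ne l ls "issued_by" (pvNe l "family_members" "issued_by" hcl (by decide))]
      rw [pvLast?_cons_ne l ls "aadhaar_link_status" (pvNe l "family_members" "aadhaar_link_status" hcl (by decide))]
    · have hcl : pvClassify l = some "issued_by" := by rw [pvClassify_eq, if_neg h1, if_neg h2, if_neg h3, if_neg h4, if_neg h5, if_pos h6]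
      rw [show (PySem.Dict.mk [("card_number", v1), ("card_type", v2), ("head_of_family", v3), ("address", v4), ("family_members", v5), ("issued_by", v6), ("aadhaar_link_status", v7)]).insert "issued_by" (pvVal l) = PySem.Dict.mk [("card_number", v1), ("card_type", v2), ("head_of_family", v3), ("address", v4), ("family_members", v5), ("issued_by", pvVal l), ("aadhaar_link_status", v7)] from rfl, ih]
      rw [pvGetD_cons_eq l ls "issued_by" v6 hcl]
      rw [pvLast?_cons_ne l ls "card_number" (pvNe l "issued_by" "card_number" hcl (by decide))]
      rw [pvLast?_cons_ne l ls "card_type" (pvNe l "issued_by" "card_type" hcl (by decide))]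
      rw [pvLast?_cons_ne l ls "head_of_family" (pvNe l "issued_by" "head_of_family" hcl (by decide))]
      rw [pvLast?_cons_ne l ls "address" (pvNe l "issued_by" "address" hcl (by decide))]
      rw [pvLast?_cons_ne l ls "family_members" (pvNe l "issued_by" "family_members" hcl (by decide))]
      rw [pvLast?_cons_ne l ls "aadhaar_link_status" (pvNe l "issued_by" "aadhaar_link_status" hcl (by decide))]
    · have hcl : pvClassify l = some "aadhaar_link_status" := by rw [pvClassify_eq, if_neg h1, if_neg h2, if_neg h3, if_neg h4, if_neg h5, if_neg h6, if_pos h7]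
      rw [show (PySem.Dict.mk [("card_number", v1), ("card_type", v2), ("head_of_family", v3), ("address", v4), ("family_members", v5), ("issued_by", v6), ("aadhaar_link_status", v7)]).insert "aadhaar_link_status" (pvVal l) = PySem.Dict.mk [("card_number", v1), ("card_type", v2), ("head_of_family", v3), ("address", v4), ("family_members", v5), ("issued_by", v6), ("aadhaar_link_status", pvVal l)] from rfl, ih]
      rw [pvGetD_cons_eq l ls "aadhaar_link_status" v7 hcl]
      rw [pvLast?_cons_ne l ls "card_number" (pvNe l "aadhaar_link_status" "card_number" hcl (by decide))]
      rw [pvLast?_cons_ne l ls "card_type" (pvNe l "aadhaar_link_status" "card_type" hcl (by decide))]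
      rw [pvLast?_cons_ne l ls "head_of_family" (pvNe l "aadhaar_link_status" "head_of_family" hcl (by decide))]
      rw [pvLast?_cons_ne l ls "address" (pvNe l "aadhaar_link_status" "address" hcl (by decide))]
      rw [pvLast?_cons_ne l ls "family_members" (pvNe l "aadhaar_link_status" "family_members" hcl (by decide))]
      rw [pvLast?_cons_ne l ls "issued_by" (pvNe l "aadhaar_link_status" "issued_by" hcl (by decide))]
    · have hcl : pvClassify l = none := by
        rw [pvClassify_eq, if_neg h1, if_neg h2, if_neg h3, if_neg h4, if_neg h5, if_neg h6, if_neg h7]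
      rw [ih]
      rw [pvLast?_cons_ne l ls "card_number" (fun hy => by rw [hcl] at hy; cases hy)]
      rw [pvLast?_cons_ne l ls "card_type" (fun hy => by rw [hcl] at hy; cases hy)]
      rw [pvLast?_cons_ne l ls "head_of_family" (fun hy => by rw [hcl] at hy; cases hy)]
      rw [pvLast?_cons_ne l ls "address" (fun hy => by rw [hcl] at hy; cases hy)]
      rw [pvLast?_cons_ne l ls "family_members" (fun hy => by rw [hcl] at hy; cases hy)]
      rw [pvLast?_cons_ne l ls "issued_by" (fun hy => by rw [hcl] at hy; cases hy)]
      rw [pvLast?_cons_ne l ls "aadhaar_link_status" (fun hy => by rw [hcl] at hy; cases hy)]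

-- ===== VERDICT (by name: the statement is the Claim_ definition above) =====
theorem parse_smartcard_data_spec : Claim_equal_parse_smartcard_data := by
  intro data _
  unfold Spec_parse_smartcard_data parse_smartcard_data parse_smartcard_data_alt
  rw [show (PySem.Dict.ofList [("card_number", ""), ("card_type", ""), ("head_of_family", ""),
      ("address", ""), ("family_members", ""), ("issued_by", ""), ("aadhaar_link_status", "")] : PySem.Dict String String)
      = PySem.Dict.mk [("card_number", ""), ("card_type", ""), ("head_of_family", ""), ("address", ""), ("family_members", ""), ("issued_by", ""), ("aadhaar_link_status", "")] from rfl]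
  rw [pvFold_eq ((PySem.Str.split? data "\n").getD [""]) "" "" "" "" "" "" ""]
  simp [pvFields, pvValueFor_eq]
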